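-- pv_equiv track=rewrite | github.com/juangarant/advent-of-code-2025 | day-02/invalidid.py | is_repetition_list
-- ===== SOURCE A (Python) =====
-- def is_repetition_list(seq):
--     n = len(seq)
--     # i es el tama침o del bloque que selecciono
--     for i in range(1, n // 2 + 1):
--         # si no es divisible el numero por el bloque paso al siguiente
--         if n % i != 0:
--             continue
--         veces_que_cabe = n // i
--         patron = seq[:i]
--
--         if patron * veces_que_cabe == seq:
--             return True, patron
--     return False, []
-- ===== SOURCE B (Python) =====
-- def is_repetition_list(seq):
--     # Find the smallest shift-period p of seq (seq[j] == seq[j-p] for all j >= p),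
--     # scanning p = 1..n//2; by the Fine-Wilf periodicity theorem, seq is a repeated
--     # block exactly when that smallest period divides n, and the block is seq[:p].
--     n = len(seq)
--     for p in range(1, n // 2 + 1):
--         if all(seq[j] == seq[j - p] for j in range(p, n)):
--             if n % p == 0:
--                 return True, seq[:p]
--             return False, []
--     return False, []
-- ===== Notes on version B (the rewrite author's own statement) =====
-- stated objective: alternative
-- what changed: Instead of trying every divisor block size and building the replicated block for comparison, B computes the smallest shift-period of the sequence by an early-exit elementwise self-comparison and decides with a single divisibility test, which is correct by the Fine-Wilf periodicity theorem.
import Mathlib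
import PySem

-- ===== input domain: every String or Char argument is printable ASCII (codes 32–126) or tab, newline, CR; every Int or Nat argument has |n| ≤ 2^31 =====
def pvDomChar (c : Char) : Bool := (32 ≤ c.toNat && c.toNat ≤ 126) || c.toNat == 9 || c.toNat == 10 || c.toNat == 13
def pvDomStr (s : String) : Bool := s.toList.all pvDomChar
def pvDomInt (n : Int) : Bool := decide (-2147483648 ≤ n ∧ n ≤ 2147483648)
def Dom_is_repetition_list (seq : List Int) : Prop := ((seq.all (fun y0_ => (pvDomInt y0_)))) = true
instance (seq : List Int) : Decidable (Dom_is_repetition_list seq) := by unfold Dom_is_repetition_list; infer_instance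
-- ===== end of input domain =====

-- B replaces A's divisor-by-divisor "build the repeated block and compare" search with a
-- smallest-shift-period scan followed by a single divisibility test (justified by the
-- Fine–Wilf periodicity theorem); proved to return exactly A's value on every input.

-- ===== PORT A =====
-- for i in range(1, n//2+1): skip non-divisors of n; compare patron * veces_que_cabe with seq
def pvALoop (seq : List Int) (n : Int) : List Int → Bool × List Int
  | [] => (false, [])
  | i :: rest =>
    if PySem.Int.mod n i ≠ 0 then pvALoop seq n rest
    else
      let veces_que_cabe := PySem.Int.floordiv n i
      let patron := PySem.List.slice seq none (some i)
      if PySem.List.pyRepeat patron veces_que_cabe = seq then (true, patron)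
      else pvALoop seq n rest

def is_repetition_list (seq : List Int) : Bool × List Int :=
  let n : Int := seq.length
  pvALoop seq n (PySem.List.pyRange 1 (PySem.Int.floordiv n 2 + 1) 1)

-- ===== PORT B =====
-- for p in range(1, n//2+1): at the first p with seq[p:] == seq[:-p], decide by n % p == 0
def pvBLoop (seq : List Int) (n : Int) : List Int → Bool × List Int
  | [] => (false, [])
  | p :: rest =>
    -- all(seq[j] == seq[j - p] for j in range(p, n)); every index j, j - p hit by the
    -- generator is in range, so pyGetD is exact for Python's seq[j] here
    if (PySem.List.pyRange p n 1).all
        (fun j => PySem.List.pyGetD seq j 0 == PySem.List.pyGetD seq (j - p) 0) then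
      if PySem.Int.mod n p = 0 then (true, PySem.List.slice seq none (some p))
      else (false, [])
    else pvBLoop seq n rest

def is_repetition_list_alt (seq : List Int) : Bool × List Int :=
  let n : Int := seq.length
  pvBLoop seq n (PySem.List.pyRange 1 (PySem.Int.floordiv n 2 + 1) 1)

-- ===== PRECONDITION & SPEC =====
def Spec_is_repetition_list (seq : List Int) (out : Bool × List Int) : Prop := out = is_repetition_list_alt seq
instance (seq : List Int) (out : Bool × List Int) : Decidable (Spec_is_repetition_list seq out) := by unfold Spec_is_repetition_list; infer_instance

-- ===== CLAIM (what is proved, stated in full; the proofs are below) =====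
def Claim_equal_is_repetition_list : Prop := ∀ (seq : List Int), Dom_is_repetition_list seq → Spec_is_repetition_list seq (is_repetition_list seq)

-- ===== LEMMAS AND PROOFS =====

-- p is a (shift) period of seq
def pvPer (seq : List Int) (p : ℕ) : Prop :=
  ∀ j, j + p < seq.length → seq.getD j 0 = seq.getD (j + p) 0

-- the Nat-level forms of the two loop tests (abbrev: decidability is inferred through it)
abbrev pvPB (seq : List Int) (p : ℕ) : Prop := seq.drop p = seq.take (seq.length - p)
def pvPA (seq : List Int) (p : ℕ) : Prop :=
  p ∣ seq.length ∧ (List.replicate (seq.length / p) (seq.take p)).flatten = seq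

lemma pvShift_iff_per (seq : List Int) (p : ℕ) : pvPB seq p ↔ pvPer seq p := by
  unfold pvPB pvPer
  constructor
  · intro h j hj
    have h2 : (seq.drop p).getD j 0 = (seq.take (seq.length - p)).getD j 0 := by rw [h]
    rw [List.getD_eq_getElem _ _ (by simp; omega), List.getD_eq_getElem _ _ (by simp; omega),
        List.getElem_drop, List.getElem_take] at h2
    rw [List.getD_eq_getElem seq 0 (by omega), List.getD_eq_getElem seq 0 hj]
    simpa [Nat.add_comm] using h2.symm
  · intro h
    apply List.ext_getElem
    · simp
    · intro j h1 h2
      simp only [List.length_drop] at h1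
      rw [List.getElem_drop, List.getElem_take]
      have hlt : j + p < seq.length := by omega
      have := h j hlt
      rw [List.getD_eq_getElem seq 0 (by omega), List.getD_eq_getElem seq 0 hlt] at this
      simpa [Nat.add_comm] using this.symm

lemma pvRep_of_shift (i : ℕ) (_hi : 1 ≤ i) : ∀ (k : ℕ) (s : List Int), s.length = k * i →
    s.drop i = s.take (s.length - i) → (List.replicate k (s.take i)).flatten = s := by
  intro k
  induction k with
  | zero =>
    intro s hlen _
    simp only [Nat.zero_mul] at hlen
    simp [List.length_eq_zero_iff.mp hlen]
  | succ k ih =>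
    intro s hlen hshift
    have hmul : s.length = k * i + i := by rw [hlen, Nat.succ_mul]
    have htlen : (s.drop i).length = k * i := by simp; omega
    have hflat : (List.replicate k (s.take i)).flatten = s.drop i := by
      rcases Nat.eq_zero_or_pos k with hk | hk
      · subst hk
        simp only [Nat.zero_mul] at htlen
        simp [(List.length_eq_zero_iff.mp htlen).symm]
      · have hki : i ≤ k * i := Nat.le_mul_of_pos_left i hk
        have htake : (s.drop i).take i = s.take i := by
          rw [hshift, List.take_take]
          congr 1
          omega
        have hts : (s.drop i).drop i = (s.drop i).take ((s.drop i).length - i) := by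
          calc (s.drop i).drop i = (s.take (s.length - i)).drop i := by rw [← hshift]
            _ = (s.drop i).take (s.length - i - i) := List.drop_take
            _ = (s.drop i).take ((s.drop i).length - i) := by simp
        have := ih (s.drop i) htlen hts
        rwa [htake] at this
    rw [List.replicate_succ, List.flatten_cons, hflat, List.take_append_drop]

lemma pvShift_of_rep (seq : List Int) (i : ℕ) (_hi : 1 ≤ i) (hdvd : i ∣ seq.length)
    (h : (List.replicate (seq.length / i) (seq.take i)).flatten = seq) : pvPB seq i := by
  unfold pvPB
  have hdm := Nat.div_mul_cancel hdvd
  rcases Nat.eq_zero_or_pos (seq.length / i) with hk | hk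
  · have h0 : seq.length = 0 := by rw [hk] at hdm; omega
    simp [List.length_eq_zero_iff.mp h0]
  · obtain ⟨k, hk'⟩ : ∃ k, seq.length / i = k + 1 := ⟨seq.length / i - 1, by omega⟩
    have hlen : seq.length = (k + 1) * i := by rw [← hdm, hk']
    have hile : i ≤ seq.length := by
      rw [hlen]; exact Nat.le_mul_of_pos_left i (Nat.succ_pos k)
    have hbl : (seq.take i).length = i := by rw [List.length_take]; omega
    have e1 : (List.replicate (seq.length / i) (seq.take i)).flatten
        = seq.take i ++ (List.replicate k (seq.take i)).flatten := by
      rw [hk', List.replicate_succ, List.flatten_cons]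
    have e2 : (List.replicate (seq.length / i) (seq.take i)).flatten
        = (List.replicate k (seq.take i)).flatten ++ seq.take i := by
      rw [hk', List.replicate_succ', List.flatten_append]
      simp
    have hflen : ((List.replicate k (seq.take i)).flatten).length = k * i := by
      simp [List.length_flatten, List.map_replicate, List.sum_replicate, hbl]
    have hseq1 : seq = seq.take i ++ (List.replicate k (seq.take i)).flatten := by
      rw [← e1]; exact h.symm
    have hseq2 : seq = (List.replicate k (seq.take i)).flatten ++ seq.take i := by
      rw [← e2]; exact h.symm
    have hd : seq.drop i = (List.replicate k (seq.take i)).flatten := by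
      conv_lhs => rw [hseq1]
      exact List.drop_left' hbl
    have hlen' : seq.length - i = k * i := by rw [hlen, Nat.succ_mul]; omega
    have ht : seq.take (seq.length - i) = (List.replicate k (seq.take i)).flatten := by
      rw [hlen']
      conv_lhs => rw [hseq2]
      exact List.take_left' hflen
    rw [hd, ht]

lemma pvRep_iff_shift (seq : List Int) (p : ℕ) (_hp : 1 ≤ p) (hdvd : p ∣ seq.length) :
    (List.replicate (seq.length / p) (seq.take p)).flatten = seq ↔ pvPB seq p := by
  constructor
  · exact pvShift_of_rep seq p _hp hdvd
  · intro hs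
    exact pvRep_of_shift p _hp (seq.length / p) seq (Nat.div_mul_cancel hdvd).symm hs

lemma pvFW_sub (seq : List Int) (p q : ℕ) (hpq : p ≤ q) (hle : p + q ≤ seq.length)
    (hp : pvPer seq p) (hq : pvPer seq q) : pvPer seq (q - p) := by
  intro j hj
  by_cases hc : j + q < seq.length
  · have e1 := hq j hc
    have e2 := hp (j + (q - p)) (by omega)
    have e3 : j + (q - p) + p = j + q := by omega
    rw [e3] at e2
    exact e1.trans e2.symm
  · have e1 := hp (j - p) (by omega)
    have e2 := hq (j - p) (by omega)
    have e3 : j - p + p = j := by omega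
    have e4 : j - p + q = j + (q - p) := by omega
    rw [e3] at e1
    rw [e4] at e2
    exact e1.symm.trans e2

lemma pvFW (seq : List Int) : ∀ (s p q : ℕ), p + q = s → 1 ≤ p → 1 ≤ q →
    p + q ≤ seq.length → pvPer seq p → pvPer seq q → pvPer seq (Nat.gcd p q) := by
  intro s
  induction s using Nat.strong_induction_on with
  | _ s ih =>
    intro p q hs hp1 hq1 hle hp hq
    rcases lt_trichotomy p q with h | h | h
    · have hsub : pvPer seq (q - p) := pvFW_sub seq p q (le_of_lt h) hle hp hq
      have hrec := ih q (by omega) p (q - p) (by omega) hp1 (by omega) (by omega) hp hsub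
      rwa [Nat.gcd_sub_self_right (le_of_lt h)] at hrec
    · rw [h, Nat.gcd_self]; exact hq
    · have hsub : pvPer seq (p - q) := pvFW_sub seq q p (le_of_lt h) (by omega) hq hp
      have hrec := ih p (by omega) q (p - q) (by omega) hq1 (by omega) (by omega) hq hsub
      rwa [Nat.gcd_sub_self_right (le_of_lt h), Nat.gcd_comm] at hrec

-- loop characterisations
def pvPredA (seq : List Int) (n c : Int) : Prop :=
  PySem.Int.mod n c = 0 ∧
    PySem.List.pyRepeat (PySem.List.slice seq none (some c)) (PySem.Int.floordiv n c) = seq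

def pvPredB (seq : List Int) (n c : Int) : Prop :=
  ((PySem.List.pyRange c n 1).all
    (fun j => PySem.List.pyGetD seq j 0 == PySem.List.pyGetD seq (j - c) 0)) = true

lemma pvALoop_none (seq : List Int) (n : Int) (cs : List Int)
    (h : ∀ c ∈ cs, ¬ pvPredA seq n c) : pvALoop seq n cs = (false, []) := by
  induction cs with
  | nil => rfl
  | cons c rest ih =>
    have hc := h c (by simp)
    simp only [pvALoop]
    split_ifs with h1 h2
    · exact ih (fun x hx => h x (by simp [hx]))
    · exact absurd ⟨not_not.mp h1, h2⟩ hc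
    · exact ih (fun x hx => h x (by simp [hx]))

lemma pvALoop_found (seq : List Int) (n : Int) (l1 : List Int) (c : Int) (l2 : List Int)
    (h1 : ∀ x ∈ l1, ¬ pvPredA seq n x) (hc : pvPredA seq n c) :
    pvALoop seq n (l1 ++ c :: l2) = (true, PySem.List.slice seq none (some c)) := by
  induction l1 with
  | nil =>
    obtain ⟨h0, hrep⟩ := hc
    simp only [List.nil_append, pvALoop]
    rw [if_neg (not_not.mpr h0)]
    rw [if_pos hrep]
  | cons x l1 ih =>
    have hx := h1 x (by simp)
    simp only [List.cons_append, pvALoop]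
    split_ifs with ha hb
    · exact ih (fun y hy => h1 y (by simp [hy]))
    · exact absurd ⟨not_not.mp ha, hb⟩ hx
    · exact ih (fun y hy => h1 y (by simp [hy]))

lemma pvBLoop_none (seq : List Int) (n : Int) (cs : List Int)
    (h : ∀ c ∈ cs, ¬ pvPredB seq n c) : pvBLoop seq n cs = (false, []) := by
  induction cs with
  | nil => rfl
  | cons c rest ih =>
    have hc := h c (by simp)
    simp only [pvBLoop]
    split_ifs with h1 h2
    · exact absurd h1 hc
    · exact absurd h1 hc
    · exact ih (fun x hx => h x (by simp [hx]))

lemma pvBLoop_found (seq : List Int) (n : Int) (l1 : List Int) (c : Int) (l2 : List Int)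
    (h1 : ∀ x ∈ l1, ¬ pvPredB seq n x) (hc : pvPredB seq n c) :
    pvBLoop seq n (l1 ++ c :: l2) =
      (if PySem.Int.mod n c = 0 then (true, PySem.List.slice seq none (some c)) else (false, [])) := by
  induction l1 with
  | nil =>
    simp only [List.nil_append, pvBLoop]
    rw [if_pos (show ((PySem.List.pyRange c n 1).all
      (fun j => PySem.List.pyGetD seq j 0 == PySem.List.pyGetD seq (j - c) 0)) = true from hc)]
  | cons x l1 ih =>
    have hx := h1 x (by simp)
    simp only [List.cons_append, pvBLoop]
    rw [if_neg (show ¬ ((PySem.List.pyRange x n 1).all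
      (fun j => PySem.List.pyGetD seq j 0 == PySem.List.pyGetD seq (j - x) 0)) = true from hx)]
    exact ih (fun y hy => h1 y (by simp [hy]))

-- bridges between the Int-level loop tests and the Nat-level predicates
lemma pvPredB_natCast (seq : List Int) (p : ℕ) (hp : 1 ≤ p) :
    pvPredB seq (seq.length : Int) (p : Int) ↔ pvPB seq p := by
  refine Iff.trans ?_ (pvShift_iff_per seq p).symm
  unfold pvPredB
  rw [List.all_eq_true]
  constructor
  · intro h j hj
    have hmem : ((j + p : ℕ) : Int) ∈ PySem.List.pyRange (p : Int) (seq.length : Int) 1 := by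
      rw [PySem.List.mem_pyRange_one]
      exact ⟨by push_cast; omega, by push_cast; omega⟩
    have h2 := h _ hmem
    rw [beq_iff_eq] at h2
    have e1 : ((j + p : ℕ) : Int) - (p : Int) = ((j : ℕ) : Int) := by push_cast; ring
    rw [e1, PySem.List.pyGetD_of_nonneg seq 0 (Int.natCast_nonneg _),
        PySem.List.pyGetD_of_nonneg seq 0 (Int.natCast_nonneg _)] at h2
    simp only [Int.toNat_natCast] at h2
    exact h2.symm
  · intro h j hjmem
    rw [PySem.List.mem_pyRange_one] at hjmem
    obtain ⟨hj1, hj2⟩ := hjmem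
    have h0 : (0 : Int) ≤ j := le_trans (Int.natCast_nonneg _) hj1
    have h0' : (0 : Int) ≤ j - (p : Int) := by omega
    rw [beq_iff_eq, PySem.List.pyGetD_of_nonneg seq 0 h0, PySem.List.pyGetD_of_nonneg seq 0 h0']
    have ht : (j - (p : Int)).toNat = j.toNat - p := by omega
    rw [ht]
    have hlt : (j.toNat - p) + p < seq.length := by omega
    have h3 := h (j.toNat - p) hlt
    have e2 : j.toNat - p + p = j.toNat := by omega
    rw [e2] at h3
    exact h3.symm

lemma pvPredA_natCast (seq : List Int) (p : ℕ) (_hp : 1 ≤ p) :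
    pvPredA seq (seq.length : Int) (p : Int) ↔ pvPA seq p := by
  unfold pvPredA pvPA
  have h1 : PySem.Int.mod (seq.length : Int) (p : Int) = 0 ↔ p ∣ seq.length := by
    rw [PySem.Int.mod_eq_zero_iff_dvd]
    exact Int.natCast_dvd_natCast
  have h2 : PySem.List.pyRepeat (PySem.List.slice seq none (some (p : Int)))
      (PySem.Int.floordiv (seq.length : Int) (p : Int))
      = (List.replicate (seq.length / p) (seq.take p)).flatten := by
    rw [PySem.List.slice_to_natCast, PySem.Int.floordiv_natCast]
    unfold PySem.List.pyRepeat
    rw [Int.toNat_natCast]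
  rw [h2]
  exact and_congr h1 Iff.rfl

-- ===== VERDICT (by name: the statement is the Claim_ definition above) =====
theorem is_repetition_list_spec : Claim_equal_is_repetition_list := by
  intro seq _
  unfold Spec_is_repetition_list
  show is_repetition_list seq = is_repetition_list_alt seq
  have hfd : PySem.Int.floordiv (seq.length : Int) 2 = ((seq.length / 2 : Nat) : Int) := by
    exact_mod_cast PySem.Int.floordiv_natCast seq.length 2
  simp only [is_repetition_list, is_repetition_list_alt, hfd]
  by_cases hex : ∃ p, 1 ≤ p ∧ p ≤ seq.length / 2 ∧ pvPB seq p
  . obtain ⟨ p0, ⟨ hp01, hp0m, hp0B ⟩, hmin ⟩ :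
        ∃ p0, (1 ≤ p0 ∧ p0 ≤ seq.length / 2 ∧ pvPB seq p0) ∧
          ∀ q, q < p0 → ¬ (1 ≤ q ∧ q ≤ seq.length / 2 ∧ pvPB seq q) :=
      ⟨ Nat.find hex, Nat.find_spec hex, fun q hq => Nat.find_min hex hq ⟩
    have hsplit : PySem.List.pyRange 1 (((seq.length / 2 : Nat) : Int) + 1) 1
        = PySem.List.pyRange 1 ((p0 : Int)) 1 ++
          ((p0 : Int) :: PySem.List.pyRange ((p0 : Int) + 1) (((seq.length / 2 : Nat) : Int) + 1) 1) := by
      rw [PySem.List.pyRange_one_append 1 ((p0 : Int)) (((seq.length / 2 : Nat) : Int) + 1)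
            (by exact_mod_cast hp01) (by push_cast; omega)]
      rw [PySem.List.pyRange_one_cons (a := (p0 : Int)) (b := ((seq.length / 2 : Nat) : Int) + 1)
            (by push_cast; omega)]
    have hpre : ∀ c, c ∈ PySem.List.pyRange 1 ((p0 : Int)) 1 → ¬ pvPredB seq (seq.length : Int) c := by
      intro c hcmem hcB
      rw [PySem.List.mem_pyRange_one] at hcmem
      obtain ⟨ hc1, hc2 ⟩ := hcmem
      have hceq : ((c.toNat : Nat) : Int) = c := by omega
      have hB : pvPB seq c.toNat := (pvPredB_natCast seq c.toNat (by omega)).mp (by rwa [hceq])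
      exact hmin c.toNat (by omega) ⟨ by omega, by omega, hB ⟩
    have hp0B' : pvPredB seq (seq.length : Int) (p0 : Int) := (pvPredB_natCast seq p0 hp01).mpr hp0B
    by_cases hdvd : p0 ∣ seq.length
    . have hA : pvPredA seq (seq.length : Int) (p0 : Int) :=
        (pvPredA_natCast seq p0 hp01).mpr ⟨ hdvd, (pvRep_iff_shift seq p0 hp01 hdvd).mpr hp0B ⟩
      have hpreA : ∀ c, c ∈ PySem.List.pyRange 1 ((p0 : Int)) 1 → ¬ pvPredA seq (seq.length : Int) c := by
        intro c hcmem hcA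
        rw [PySem.List.mem_pyRange_one] at hcmem
        obtain ⟨ hc1, hc2 ⟩ := hcmem
        have hceq : ((c.toNat : Nat) : Int) = c := by omega
        have hPA : pvPA seq c.toNat := (pvPredA_natCast seq c.toNat (by omega)).mp (by rwa [hceq])
        have hB : pvPB seq c.toNat := (pvRep_iff_shift seq c.toNat (by omega) hPA.1).mp hPA.2
        exact hmin c.toNat (by omega) ⟨ by omega, by omega, hB ⟩
      rw [hsplit, pvALoop_found seq (seq.length : Int) _ ((p0 : Int)) _ hpreA hA,
          pvBLoop_found seq (seq.length : Int) _ ((p0 : Int)) _ hpre hp0B']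
      rw [if_pos ((PySem.Int.mod_eq_zero_iff_dvd _ _).mpr (Int.natCast_dvd_natCast.mpr hdvd))]
    . have hnotA : ∀ c, c ∈ PySem.List.pyRange 1 (((seq.length / 2 : Nat) : Int) + 1) 1 ->
          ¬ pvPredA seq (seq.length : Int) c := by
        intro c hcmem hcA
        rw [PySem.List.mem_pyRange_one] at hcmem
        obtain ⟨ hc1, hc2 ⟩ := hcmem
        have hceq : ((c.toNat : Nat) : Int) = c := by omega
        have hq1 : 1 ≤ c.toNat := by omega
        have hqm : c.toNat ≤ seq.length / 2 := by omega
        have hPA : pvPA seq c.toNat := (pvPredA_natCast seq c.toNat hq1).mp (by rwa [hceq])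
        have hqB : pvPB seq c.toNat := (pvRep_iff_shift seq c.toNat hq1 hPA.1).mp hPA.2
        have hp0le : p0 ≤ c.toNat := by
          by_contra hlt
          exact hmin c.toNat (by omega) ⟨ hq1, hqm, hqB ⟩
        have hper := pvFW seq (p0 + c.toNat) p0 c.toNat rfl hp01 hq1 (by omega)
          ((pvShift_iff_per seq p0).mp hp0B) ((pvShift_iff_per seq c.toNat).mp hqB)
        have hg1 : 0 < Nat.gcd p0 c.toNat := Nat.gcd_pos_of_pos_left c.toNat (by omega)
        have hgle : Nat.gcd p0 c.toNat ≤ p0 := Nat.gcd_le_left c.toNat (by omega)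
        have hgB : pvPB seq (Nat.gcd p0 c.toNat) :=
          (pvShift_iff_per seq (Nat.gcd p0 c.toNat)).mpr hper
        have hge : p0 ≤ Nat.gcd p0 c.toNat := by
          by_contra hlt
          exact hmin (Nat.gcd p0 c.toNat) (by omega) ⟨ by omega, by omega, hgB ⟩
        have hgeq : Nat.gcd p0 c.toNat = p0 := by omega
        have hp0q : p0 ∣ c.toNat := hgeq ▸ Nat.gcd_dvd_right p0 c.toNat
        exact hdvd (hp0q.trans hPA.1)
      rw [pvALoop_none seq (seq.length : Int) _ hnotA, hsplit,
          pvBLoop_found seq (seq.length : Int) _ ((p0 : Int)) _ hpre hp0B']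
      rw [if_neg (fun h0 => hdvd (Int.natCast_dvd_natCast.mp
            ((PySem.Int.mod_eq_zero_iff_dvd _ _).mp h0)))]
  . have hnotB : ∀ c, c ∈ PySem.List.pyRange 1 (((seq.length / 2 : Nat) : Int) + 1) 1 ->
        ¬ pvPredB seq (seq.length : Int) c := by
      intro c hcmem hcB
      rw [PySem.List.mem_pyRange_one] at hcmem
      obtain ⟨ hc1, hc2 ⟩ := hcmem
      have hceq : ((c.toNat : Nat) : Int) = c := by omega
      have hB : pvPB seq c.toNat := (pvPredB_natCast seq c.toNat (by omega)).mp (by rwa [hceq])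
      exact hex ⟨ c.toNat, by omega, by omega, hB ⟩
    have hnotA : ∀ c, c ∈ PySem.List.pyRange 1 (((seq.length / 2 : Nat) : Int) + 1) 1 ->
        ¬ pvPredA seq (seq.length : Int) c := by
      intro c hcmem hcA
      rw [PySem.List.mem_pyRange_one] at hcmem
      obtain ⟨ hc1, hc2 ⟩ := hcmem
      have hceq : ((c.toNat : Nat) : Int) = c := by omega
      have hPA : pvPA seq c.toNat := (pvPredA_natCast seq c.toNat (by omega)).mp (by rwa [hceq])
      have hB : pvPB seq c.toNat := (pvRep_iff_shift seq c.toNat (by omega) hPA.1).mp hPA.2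
      exact hex ⟨ c.toNat, by omega, by omega, hB ⟩
    rw [pvALoop_none seq (seq.length : Int) _ hnotA, pvBLoop_none seq (seq.length : Int) _ hnotB]
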